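-- pv_equiv track=rewrite | github.com/mbaljko/vault-grading-pipeline | 01_units/pipelines/pl1C_rubric_devt/python/generate-scoring-report_non_Layer0_consuming.py | build_changed_score_history_rows
-- ===== SOURCE A (Python) =====
-- def derive_display_history_labels(history_labels: list[str]) -> list[str]:
-- 	return list(reversed(history_labels))
--
-- def summarize_score_value(evidence_status: str) -> str:
-- 	normalized = evidence_status.strip().lower()
-- 	if normalized == "present":
-- 		return "P"
-- 	if normalized == "not_present":
-- 		return "N"
-- 	return evidence_status.strip()
--
-- def build_changed_score_history_rows(
-- 	changed_diff_rows: list[list[str]],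
-- 	history_labels: list[str],
-- 	historical_rows_by_label: dict[str, dict[str, list[dict[str, str]]]],
-- ) -> list[list[str]]:
-- 	display_history_labels = derive_display_history_labels(history_labels)
-- 	indexes_by_label: dict[str, dict[str, dict[tuple[str, str], dict[str, str]]]] = {}
-- 	for history_label in history_labels:
-- 		component_indexes: dict[str, dict[tuple[str, str], dict[str, str]]] = {}
-- 		for component_id, rows in historical_rows_by_label.get(history_label, {}).items():
-- 			component_indexes[component_id] = {
-- 				(
-- 					(row.get("indicator_id") or "").strip(),
-- 					(row.get("submission_id") or "").strip(),
-- 				): row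
-- 				for row in rows
-- 				if (row.get("indicator_id") or "").strip() and (row.get("submission_id") or "").strip()
-- 			}
-- 		indexes_by_label[history_label] = component_indexes
--
-- 	history_rows: list[list[str]] = []
-- 	for changed_row in changed_diff_rows:
-- 		component_id, indicator_id, submission_id = changed_row[:3]
-- 		row_values = [component_id, indicator_id, submission_id]
-- 		for history_label in display_history_labels:
-- 			row = indexes_by_label.get(history_label, {}).get(component_id, {}).get((indicator_id, submission_id))
-- 			row_values.append(summarize_score_value(row.get("evidence_status") or "") if row is not None else "")
-- 		history_rows.append(row_values)
-- 	return history_rows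
-- ===== SOURCE B (Python) =====
-- def summarize_score_value(evidence_status: str) -> str:
-- 	normalized = evidence_status.strip().lower()
-- 	if normalized == "present":
-- 		return "P"
-- 	if normalized == "not_present":
-- 		return "N"
-- 	return evidence_status.strip()
--
--
-- def score_cell(rows, indicator_id, submission_id):
-- 	match = None
-- 	for row in rows:
-- 		ind = (row.get("indicator_id") or "").strip()
-- 		sub = (row.get("submission_id") or "").strip()
-- 		if ind and sub and ind == indicator_id and sub == submission_id:
-- 			match = row
-- 	return "" if match is None else summarize_score_value(match.get("evidence_status") or "")
--
--
-- def make_history_row(changed_row, labels, historical_rows_by_label):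
-- 	component_id, indicator_id, submission_id = changed_row[:3]
-- 	return [component_id, indicator_id, submission_id] + [
-- 		score_cell(
-- 			historical_rows_by_label.get(label, {}).get(component_id, []),
-- 			indicator_id,
-- 			submission_id,
-- 		)
-- 		for label in labels
-- 	]
--
--
-- def build_changed_score_history_rows(
-- 	changed_diff_rows,
-- 	history_labels,
-- 	historical_rows_by_label,
-- ):
-- 	labels = list(reversed(history_labels))
-- 	return [
-- 		make_history_row(changed_row, labels, historical_rows_by_label)
-- 		for changed_row in changed_diff_rows
-- 	]
-- ===== Notes on version B (the rewrite author's own statement) =====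
-- stated objective: simpler
-- what changed: B drops A's precomputed per-label/per-component hash indexes and instead, for each changed row and history label, scans that component's historical row list directly, keeping the last match (the same row A's dict comprehension keeps).
import Mathlib
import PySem

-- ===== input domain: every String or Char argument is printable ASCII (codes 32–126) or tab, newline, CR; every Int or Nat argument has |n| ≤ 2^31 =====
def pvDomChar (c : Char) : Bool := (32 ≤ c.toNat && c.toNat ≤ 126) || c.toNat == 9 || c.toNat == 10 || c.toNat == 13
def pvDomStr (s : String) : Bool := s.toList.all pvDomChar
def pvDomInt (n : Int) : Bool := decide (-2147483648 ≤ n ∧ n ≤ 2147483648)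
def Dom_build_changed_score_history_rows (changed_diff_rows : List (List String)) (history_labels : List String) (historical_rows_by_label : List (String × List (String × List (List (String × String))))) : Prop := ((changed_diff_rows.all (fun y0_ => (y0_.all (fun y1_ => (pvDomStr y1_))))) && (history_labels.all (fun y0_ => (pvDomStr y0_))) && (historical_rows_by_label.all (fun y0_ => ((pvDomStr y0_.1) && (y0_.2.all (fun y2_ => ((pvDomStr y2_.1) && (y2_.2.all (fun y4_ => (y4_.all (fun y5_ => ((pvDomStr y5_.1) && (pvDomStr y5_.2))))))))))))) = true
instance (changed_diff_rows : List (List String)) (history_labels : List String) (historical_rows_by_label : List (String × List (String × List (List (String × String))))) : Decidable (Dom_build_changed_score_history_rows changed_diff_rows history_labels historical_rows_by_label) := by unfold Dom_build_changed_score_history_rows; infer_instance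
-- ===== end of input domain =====

-- B drops A's per-label hash-index precomputation and instead scans each component's
-- historical row list directly (keeping the last match) per changed row and label:
-- a simpler decomposition, same results. Objective: alternative/simpler; no speed claim.

-- ===== PORT A =====
-- shared helper: port of the module helper summarize_score_value
def summarize_score_value (evidence_status : String) : String :=
  let normalized := PySem.Str.lower (PySem.Str.strip evidence_status)
  if normalized = "present" then "P"
  else if normalized = "not_present" then "N"
  else PySem.Str.strip evidence_status

-- shared helper: port of `(row.get(k) or "")` on a dict[str,str] row
def rowGetOrEmpty (row : List (String × String)) (k : String) : String :=
  ((PySem.Dict.mk row).get? k).getD ""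

-- the dict comprehension of A: {(ind, sub): row for row in rows if ind and sub}
def pvAIndexRows (rows : List (List (String × String))) :
    PySem.Dict (String × String) (List (String × String)) :=
  rows.foldl (fun d row =>
    let ind := PySem.Str.strip (rowGetOrEmpty row "indicator_id")
    let sub := PySem.Str.strip (rowGetOrEmpty row "submission_id")
    if ind ≠ "" ∧ sub ≠ "" then d.insert (ind, sub) row else d) PySem.Dict.empty

-- A's inner loop: component_indexes[component_id] = {...} over .items()
def pvAComponentIndexes (inner : List (String × List (List (String × String)))) :
    PySem.Dict String (PySem.Dict (String × String) (List (String × String))) :=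
  inner.foldl (fun d p => d.insert p.1 (pvAIndexRows p.2)) PySem.Dict.empty

def build_changed_score_history_rows (changed_diff_rows : List (List String)) (history_labels : List String) (historical_rows_by_label : List (String × List (String × List (List (String × String))))) : List (List String) :=
  let display_history_labels := history_labels.reverse
  let indexes_by_label :=
    history_labels.foldl (fun d history_label =>
      d.insert history_label
        (pvAComponentIndexes
          (((PySem.Dict.mk historical_rows_by_label).get? history_label).getD [])))
      PySem.Dict.empty
  changed_diff_rows.foldl (fun history_rows changed_row =>
    match PySem.List.slice changed_row none (some 3) with
    | [component_id, indicator_id, submission_id] =>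
      let row_values :=
        display_history_labels.foldl (fun rv history_label =>
          let row? := (((indexes_by_label.getD history_label PySem.Dict.empty).getD
              component_id PySem.Dict.empty).get? (indicator_id, submission_id))
          rv ++ [match row? with
                 | some row => summarize_score_value (rowGetOrEmpty row "evidence_status")
                 | none => ""]) [component_id, indicator_id, submission_id]
      history_rows ++ [row_values]
    | _ => history_rows ++ [[]]  -- unreachable under Pre_ (Python raises ValueError here)
    ) []

-- ===== PORT B =====
-- B's score_cell: scan rows, keep the LAST matching row
def pvBScoreCell (rows : List (List (String × String))) (indicator_id submission_id : String) : String :=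
  let mtch := rows.foldl (fun acc row =>
    let ind := PySem.Str.strip (rowGetOrEmpty row "indicator_id")
    let sub := PySem.Str.strip (rowGetOrEmpty row "submission_id")
    if ind ≠ "" ∧ sub ≠ "" ∧ ind = indicator_id ∧ sub = submission_id then some row else acc)
    (none : Option (List (String × String)))
  (mtch.map (fun row => summarize_score_value (rowGetOrEmpty row "evidence_status"))).getD ""

-- B's unpacking of changed_row[:3] (None = Python's ValueError on unpacking; outside Pre_)
def pvBUnpack3 (xs : List String) : Option (String × String × String) :=
  if 3 ≤ xs.length then some (xs.headD "", (xs.drop 1).headD "", (xs.drop 2).headD "") else none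

-- B's make_history_row
def pvBMakeHistoryRow (changed_row : List String) (labels : List String)
    (historical_rows_by_label : List (String × List (String × List (List (String × String))))) : List String :=
  ((pvBUnpack3 (PySem.List.slice changed_row none (some 3))).map (fun cis =>
    [cis.1, cis.2.1, cis.2.2] ++
      labels.map (fun label =>
        pvBScoreCell
          ((((PySem.Dict.mk historical_rows_by_label).get? label).getD []
              |> PySem.Dict.mk).get? cis.1 |>.getD [])
          cis.2.1 cis.2.2))).getD []

def build_changed_score_history_rows_alt (changed_diff_rows : List (List String)) (history_labels : List String) (historical_rows_by_label : List (String × List (String × List (List (String × String))))) : List (List String) :=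
  let labels := history_labels.reverse
  changed_diff_rows.map (fun changed_row => pvBMakeHistoryRow changed_row labels historical_rows_by_label)

-- ===== PRECONDITION & SPEC =====
-- Pre_ excludes changed rows with fewer than 3 fields, on which A raises ValueError while
-- unpacking, and association lists whose keys are not distinct, which do not represent a
-- Python dict (the dict-typed arguments are encoded as association lists with unique keys).
def Pre_build_changed_score_history_rows (changed_diff_rows : List (List String)) (history_labels : List String) (historical_rows_by_label : List (String × List (String × List (List (String × String))))) : Prop :=
  (∀ r ∈ changed_diff_rows, 3 ≤ r.length) ∧
  (historical_rows_by_label.map Prod.fst).Nodup ∧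
  (∀ p ∈ historical_rows_by_label, (p.2.map Prod.fst).Nodup ∧
    ∀ rows ∈ p.2, ∀ row ∈ rows.2, (row.map Prod.fst).Nodup)
instance (changed_diff_rows : List (List String)) (history_labels : List String) (historical_rows_by_label : List (String × List (String × List (List (String × String))))) : Decidable (Pre_build_changed_score_history_rows changed_diff_rows history_labels historical_rows_by_label) := by unfold Pre_build_changed_score_history_rows; infer_instance

def pvWitness_build_changed_score_history_rows : List (List String) × List String × (List (String × List (String × List (List (String × String))))) :=
  ([["c1", "i1", "s1"]], ["2024", "2025"],
   [("2024", [("c1", [[("indicator_id", "i1"), ("submission_id", "s1"), ("evidence_status", "present")]])]),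
    ("2025", [("c1", [[("indicator_id", " i1 "), ("submission_id", "s1"), ("evidence_status", "not_present")]])])])

def Spec_build_changed_score_history_rows (changed_diff_rows : List (List String)) (history_labels : List String) (historical_rows_by_label : List (String × List (String × List (List (String × String))))) (out : List (List String)) : Prop := out = build_changed_score_history_rows_alt changed_diff_rows history_labels historical_rows_by_label
instance (changed_diff_rows : List (List String)) (history_labels : List String) (historical_rows_by_label : List (String × List (String × List (List (String × String))))) (out : List (List String)) : Decidable (Spec_build_changed_score_history_rows changed_diff_rows history_labels historical_rows_by_label out) := by unfold Spec_build_changed_score_history_rows; infer_instance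

-- ===== CLAIM (what is proved, stated in full; the proofs are below) =====
def Claim_equal_build_changed_score_history_rows : Prop := ∀ (changed_diff_rows : List (List String)) (history_labels : List String) (historical_rows_by_label : List (String × List (String × List (List (String × String))))), Dom_build_changed_score_history_rows changed_diff_rows history_labels historical_rows_by_label → Pre_build_changed_score_history_rows changed_diff_rows history_labels historical_rows_by_label → Spec_build_changed_score_history_rows changed_diff_rows history_labels historical_rows_by_label (build_changed_score_history_rows changed_diff_rows history_labels historical_rows_by_label)

-- ===== LEMMAS AND PROOFS =====

theorem pv_witness_ok :
    Dom_build_changed_score_history_rows (pvWitness_build_changed_score_history_rows.1) (pvWitness_build_changed_score_history_rows.2.1) (pvWitness_build_changed_score_history_rows.2.2) ∧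
    Pre_build_changed_score_history_rows (pvWitness_build_changed_score_history_rows.1) (pvWitness_build_changed_score_history_rows.2.1) (pvWitness_build_changed_score_history_rows.2.2) := by
  decide

-- the hash index built by A's comprehension answers the same query as B's last-match scan
theorem pvAIndexRows_get_eq_scan (rows : List (List (String × String))) (i s : String) :
    ∀ (d : PySem.Dict (String × String) (List (String × String)))
      (acc : Option (List (String × String))), d.get? (i, s) = acc →
    (rows.foldl (fun d row =>
        let ind := PySem.Str.strip (rowGetOrEmpty row "indicator_id")
        let sub := PySem.Str.strip (rowGetOrEmpty row "submission_id")
        if ind ≠ "" ∧ sub ≠ "" then d.insert (ind, sub) row else d) d).get? (i, s) =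
    rows.foldl (fun acc row =>
        let ind := PySem.Str.strip (rowGetOrEmpty row "indicator_id")
        let sub := PySem.Str.strip (rowGetOrEmpty row "submission_id")
        if ind ≠ "" ∧ sub ≠ "" ∧ ind = i ∧ sub = s then some row else acc) acc := by
  induction rows with
  | nil => intro d acc h; simpa using h
  | cons row rest ih =>
    intro d acc h
    simp only [List.foldl_cons]
    apply ih
    dsimp only
    by_cases hne : PySem.Str.strip (rowGetOrEmpty row "indicator_id") ≠ "" ∧
                   PySem.Str.strip (rowGetOrEmpty row "submission_id") ≠ ""
    · by_cases hk : PySem.Str.strip (rowGetOrEmpty row "indicator_id") = i ∧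
                    PySem.Str.strip (rowGetOrEmpty row "submission_id") = s
      · rw [if_pos hne, if_pos ⟨hne.1, hne.2, hk.1, hk.2⟩, hk.1, hk.2]
        exact PySem.Dict.get?_insert_self d (i, s) row
      · rw [if_pos hne, if_neg (fun hc => hk ⟨hc.2.2.1, hc.2.2.2⟩),
            PySem.Dict.get?_insert_of_ne d row
              (fun hc => hk ⟨congrArg Prod.fst hc.symm, congrArg Prod.snd hc.symm⟩)]
        exact h
    · rw [if_neg hne, if_neg (fun hc => hne ⟨hc.1, hc.2.1⟩)]
      exact h

-- a fold that inserts f l at key l answers f lab for lab ∈ labels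
theorem pv_foldl_insert_get {β : Type} (f : String → β) (lab : String) (labels : List String) :
    ∀ (d : PySem.Dict String β),
    (labels.foldl (fun d l => d.insert l (f l)) d).get? lab =
      if lab ∈ labels then some (f lab) else d.get? lab := by
  induction labels with
  | nil => intro d; simp
  | cons l rest ih =>
    intro d
    simp only [List.foldl_cons, ih]
    by_cases hmem : lab ∈ rest
    · simp [hmem]
    · by_cases heq : lab = l
      · subst heq; simp [hmem, PySem.Dict.get?_insert_self]
      · simp [hmem, heq, PySem.Dict.get?_insert_of_ne _ _ heq]

-- a fold over an assoc list with distinct keys answers like first-match lookup, mapped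
theorem pv_foldl_insert_assoc {α β : Type} (g : α → β)
    (inner : List (String × α)) (k : String)
    (hnd : (inner.map Prod.fst).Nodup) :
    ∀ (d : PySem.Dict String β),
    (inner.foldl (fun d p => d.insert p.1 (g p.2)) d).get? k =
      match (PySem.Dict.mk inner).get? k with
      | some v => some (g v)
      | none => d.get? k := by
  induction inner with
  | nil => intro d; simp [PySem.Dict.get?]
  | cons p rest ih =>
    intro d
    simp only [List.map_cons, List.nodup_cons] at hnd
    obtain ⟨p1, p2⟩ := p
    simp only [List.foldl_cons, ih hnd.2, PySem.Dict.get?_mk_cons]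
    by_cases heq : p1 = k
    · have hnotin : (PySem.Dict.mk rest).get? k = none := by
        rw [PySem.Dict.get?_eq_none_iff_not_mem_keys]
        simpa [PySem.Dict.keys, heq] using hnd.1
      simp [hnotin, heq, PySem.Dict.get?_insert_self]
    · simp only [beq_iff_eq, heq, if_false]
      cases hrest : (PySem.Dict.mk rest).get? k with
      | some v => simp
      | none => simp [PySem.Dict.get?_insert_of_ne _ _ (Ne.symm heq)]

-- proof-only name for the row A's loops produce (same term as in port A's body)
def pvARow (hl : List String) (hrbl : List (String × List (String × List (List (String × String)))))
    (changed_row : List String) : List String :=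
  match PySem.List.slice changed_row none (some 3) with
  | [component_id, indicator_id, submission_id] =>
    (hl.reverse).foldl (fun rv history_label =>
      rv ++ [match (((hl.foldl (fun d history_label =>
                d.insert history_label
                  (pvAComponentIndexes (((PySem.Dict.mk hrbl).get? history_label).getD [])))
              PySem.Dict.empty).getD history_label PySem.Dict.empty).getD component_id
              PySem.Dict.empty).get? (indicator_id, submission_id) with
             | some row => summarize_score_value (rowGetOrEmpty row "evidence_status")
             | none => ""]) [component_id, indicator_id, submission_id]
  | _ => []

-- the history cell A computes through its indexes equals B's direct scan of the same rows
theorem pv_cell_eq (hrbl : List (String × List (String × List (List (String × String)))))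
    (hnd : ∀ p ∈ hrbl, (p.2.map Prod.fst).Nodup) (lab c i s : String) :
    (match ((pvAComponentIndexes (((PySem.Dict.mk hrbl).get? lab).getD [])).getD c
        PySem.Dict.empty).get? (i, s) with
     | some row => summarize_score_value (rowGetOrEmpty row "evidence_status")
     | none => "") =
    pvBScoreCell ((((PySem.Dict.mk hrbl).get? lab).getD []
        |> PySem.Dict.mk).get? c |>.getD []) i s := by
  have hndin : ((((PySem.Dict.mk hrbl).get? lab).getD []).map Prod.fst).Nodup := by
    cases hv : (PySem.Dict.mk hrbl).get? lab with
    | none => simp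
    | some v =>
      have hmem := PySem.Dict.mem_items_of_get?_eq_some _ hv
      simpa using hnd _ hmem
  rw [PySem.Dict.getD_eq_get?_getD]
  unfold pvAComponentIndexes
  rw [pv_foldl_insert_assoc pvAIndexRows _ c hndin]
  cases hc : (PySem.Dict.mk (((PySem.Dict.mk hrbl).get? lab).getD [])).get? c with
  | none =>
    simp only [Option.getD_none, PySem.Dict.get?_empty]
    rfl
  | some v =>
    simp only [Option.getD_some]
    unfold pvAIndexRows
    rw [pvAIndexRows_get_eq_scan v i s PySem.Dict.empty none (PySem.Dict.get?_empty _)]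
    unfold pvBScoreCell
    dsimp only
    cases List.foldl (fun acc row =>
        if PySem.Str.strip (rowGetOrEmpty row "indicator_id") ≠ "" ∧
           PySem.Str.strip (rowGetOrEmpty row "submission_id") ≠ "" ∧
           PySem.Str.strip (rowGetOrEmpty row "indicator_id") = i ∧
           PySem.Str.strip (rowGetOrEmpty row "submission_id") = s then some row else acc)
      none v with
    | none => rfl
    | some r => simp

-- per changed row: A's row equals B's row
theorem pv_row_eq (hl : List String)
    (hrbl : List (String × List (String × List (List (String × String)))))
    (row : List String) (h3 : 3 ≤ row.length)
    (hnd : ∀ p ∈ hrbl, (p.2.map Prod.fst).Nodup) :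
    pvARow hl hrbl row = pvBMakeHistoryRow row hl.reverse hrbl := by
  unfold pvARow pvBMakeHistoryRow
  rw [PySem.List.slice_to row (b := 3) (by norm_num)]
  obtain ⟨a, b, c, hs⟩ : ∃ a b c, row.take (3 : Int).toNat = [a, b, c] := by
    match row, h3 with
    | a :: b :: c :: t, _ => exact ⟨a, b, c, rfl⟩
  rw [hs]
  simp only [pvBUnpack3, List.length_cons, List.length_nil, List.drop_succ_cons, List.drop_zero,
    List.headD_cons, if_pos (by omega : (3:Nat) ≤ 3), Option.map_some, Option.getD_some]
  rw [PySem.List.foldl_append_singleton_eq_map]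
  congr 1
  apply List.map_congr_left
  intro lab hlab
  have hmem : lab ∈ hl := List.mem_reverse.mp hlab
  rw [PySem.Dict.getD_eq_get?_getD (k := lab), pv_foldl_insert_get
        (fun l => pvAComponentIndexes (((PySem.Dict.mk hrbl).get? l).getD [])) lab hl
        PySem.Dict.empty, if_pos hmem]
  exact pv_cell_eq hrbl hnd lab a b c

-- ===== VERDICT (by name: the statement is the Claim_ definition above) =====
theorem build_changed_score_history_rows_spec : Claim_equal_build_changed_score_history_rows := by
  intro cdr hl hrbl _hdom hpre
  obtain ⟨hlen, _hndout, hnd⟩ := hpre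
  unfold Spec_build_changed_score_history_rows
  unfold build_changed_score_history_rows build_changed_score_history_rows_alt
  dsimp only
  rw [PySem.List.foldl_congr_mem cdr _ (fun acc r => acc ++ [pvARow hl hrbl r]) []
      (by
        intro acc r _
        unfold pvARow
        dsimp only
        cases hsl : PySem.List.slice r none (some 3) with
        | nil => rfl
        | cons a t1 =>
          cases t1 with
          | nil => rfl
          | cons b t2 =>
            cases t2 with
            | nil => rfl
            | cons c t3 =>
              cases t3 with
              | nil => rfl
              | cons d t4 => rfl),
      PySem.List.foldl_append_singleton_eq_map]
  simp only [List.nil_append]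
  exact List.map_congr_left (fun r hr => pv_row_eq hl hrbl r (hlen r hr) (fun p hp => (hnd p hp).1))
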